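-- pv_equiv track=rewrite | github.com/kenbockler/Andmeteaduse_masin-ppe_projekt | PROJEKT/K11/S335/2021-11-11-04-50-11/kodu2.py | transponeeriK
-- ===== SOURCE A (Python) =====
-- def transponeeriK(maatriks):
--     t_maatriks = []
--     for i in range(len(maatriks)-1,-1,-1):
--         t_maatriks_r = []
--         for j in range((len(maatriks[0])-1),-1,-1):
--             t_maatriks_r += [maatriks[i][j]]
--         t_maatriks += [t_maatriks_r]
--     jär1 = []
--     jär_trans = []
--     i1 = 0
--     j1 = 0
--     while True:
--         if i1 >= len(t_maatriks):
--             i1 = 0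
--             j1 += 1
--         if j1 >= len(t_maatriks[0]):
--             break
--         jär1.append(t_maatriks[i1][j1])
--         i1 += 1
--         if len(jär1) == len(t_maatriks):
--             jär_trans.append(jär1)
--             jär1 = []
--     return jär_trans
-- ===== SOURCE B (Python) =====
-- def transponeeriK(maatriks):
--     n = len(maatriks)
--     m = len(maatriks[0])
--     return [[maatriks[n - 1 - c][m - 1 - r] for c in range(n)] for r in range(m)]
-- ===== Notes on version B (the rewrite author's own statement) =====
-- stated objective: simpler
-- what changed: B collapses A's two phases (build a 180-degree-rotated intermediate matrix, then transpose it with a stateful while-loop chunker) into one direct double comprehension computing out[r][c] = maatriks[n-1-c][m-1-r], with no intermediate matrix and no mutable loop state.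
import Mathlib
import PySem

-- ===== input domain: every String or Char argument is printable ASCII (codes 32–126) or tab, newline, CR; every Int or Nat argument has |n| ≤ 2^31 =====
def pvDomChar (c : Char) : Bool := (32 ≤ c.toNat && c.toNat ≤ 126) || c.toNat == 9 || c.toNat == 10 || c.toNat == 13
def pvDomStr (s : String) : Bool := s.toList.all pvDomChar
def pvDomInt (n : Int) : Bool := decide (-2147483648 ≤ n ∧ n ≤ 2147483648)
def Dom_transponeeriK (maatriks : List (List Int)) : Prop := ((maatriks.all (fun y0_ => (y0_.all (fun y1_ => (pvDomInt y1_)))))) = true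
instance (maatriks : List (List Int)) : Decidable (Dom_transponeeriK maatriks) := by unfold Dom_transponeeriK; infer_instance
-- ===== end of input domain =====

-- B replaces A's two phases (180°-rotated intermediate + stateful while-loop transpose) by one
-- direct double comprehension out[r][c] = maatriks[n-1-c][m-1-r]; objective: simpler.

-- ===== PORT A =====
-- A's 'while True' phase-2 loop, transliterated step for step; the fuel argument is only a
-- totality guard (the caller passes a provably sufficient amount).
def transpLoop (t : List (List Int)) : Nat → Nat → Nat → List Int → List (List Int) → List (List Int)
  | 0, _, _, _, acc => acc
  | fuel + 1, i1, j1, jar, acc =>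
    let i1' := if i1 ≥ t.length then 0 else i1
    let j1' := if i1 ≥ t.length then j1 + 1 else j1
    if j1' ≥ (PySem.List.pyGetD t 0 []).length then acc
    else
      let jar' := jar ++ [PySem.List.pyGetD (PySem.List.pyGetD t (i1' : Int) []) (j1' : Int) 0]
      if jar'.length = t.length then transpLoop t fuel (i1' + 1) j1' [] (acc ++ [jar'])
      else transpLoop t fuel (i1' + 1) j1' jar' acc

def transponeeriK (maatriks : List (List Int)) : List (List Int) :=
  let t :=
    (PySem.List.pyRange ((maatriks.length : Int) - 1) (-1) (-1)).foldl (fun tAcc i =>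
      tAcc ++ [(PySem.List.pyRange (((PySem.List.pyGetD maatriks 0 []).length : Int) - 1) (-1) (-1)).foldl
        (fun rAcc j => rAcc ++ [PySem.List.pyGetD (PySem.List.pyGetD maatriks i []) j 0]) []]) []
  transpLoop t ((t.length + 1) * ((PySem.List.pyGetD t 0 []).length + 1) + 2) 0 0 [] []

-- ===== PORT B =====
def transponeeriK_alt (maatriks : List (List Int)) : List (List Int) :=
  let n := maatriks.length
  let m := (PySem.List.pyGetD maatriks 0 []).length
  (List.range m).map (fun (r : Nat) => (List.range n).map (fun (c : Nat) =>
    PySem.List.pyGetD (PySem.List.pyGetD maatriks ((n : Int) - 1 - (c : Int)) [])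
      ((m : Int) - 1 - (r : Int)) 0))

-- ===== PRECONDITION & SPEC =====
-- Pre_ excludes exactly the inputs where Python A raises IndexError: the empty matrix
-- (maatriks[0]) and matrices with a row shorter than the first row (maatriks[i][j]);
-- Python B raises on exactly the same inputs.
def Pre_transponeeriK (maatriks : List (List Int)) : Prop :=
  maatriks ≠ [] ∧ ∀ row ∈ maatriks, (maatriks.headD []).length ≤ row.length
instance (maatriks : List (List Int)) : Decidable (Pre_transponeeriK maatriks) := by
  unfold Pre_transponeeriK; infer_instance

def pvWitness_transponeeriK : List (List Int) := [[1, 2], [3, 4]]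

def Spec_transponeeriK (maatriks : List (List Int)) (out : List (List Int)) : Prop := out = transponeeriK_alt maatriks
instance (maatriks : List (List Int)) (out : List (List Int)) : Decidable (Spec_transponeeriK maatriks out) := by unfold Spec_transponeeriK; infer_instance

-- ===== CLAIM (what is proved, stated in full; the proofs are below) =====
def Claim_equal_transponeeriK : Prop := ∀ (maatriks : List (List Int)), Dom_transponeeriK maatriks → Pre_transponeeriK maatriks → Spec_transponeeriK maatriks (transponeeriK maatriks)

-- ===== LEMMAS AND PROOFS =====

-- the j-th column of t (what one chunk of A's while-loop produces)
def colT (t : List (List Int)) (j : Nat) : List Int := t.map (fun row => row.getD j 0)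

lemma length_colT (t : List (List Int)) (j : Nat) : (colT t j).length = t.length := by
  simp [colT]

lemma getElem_colT (t : List (List Int)) (j i : Nat) (hi : i < t.length) :
    (colT t j)[i]'(by simpa [colT] using hi) = t[i].getD j 0 := by
  simp [colT]

lemma pyGetD_colT (t : List (List Int)) (j i : Nat) (hi : i < t.length) :
    PySem.List.pyGetD (PySem.List.pyGetD t ((i : Nat) : Int) []) ((j : Nat) : Int) 0
      = (colT t j)[i]'(by rw [length_colT]; exact hi) := by
  rw [PySem.List.pyGetD_natCast, PySem.List.pyGetD_natCast, getElem_colT t j i hi]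
  rw [List.getD_eq_getElem t [] hi]

-- one iteration of A's while loop, i1 < len(t): no reset
lemma transpLoop_step_lt (t : List (List Int)) (fuel i1 j1 : Nat) (jar : List Int)
    (acc : List (List Int)) (h : i1 < t.length) :
    transpLoop t (fuel + 1) i1 j1 jar acc =
      if j1 ≥ (PySem.List.pyGetD t 0 []).length then acc
      else
        if (jar ++ [PySem.List.pyGetD (PySem.List.pyGetD t (i1 : Int) []) (j1 : Int) 0]).length = t.length
        then transpLoop t fuel (i1 + 1) j1 []
          (acc ++ [jar ++ [PySem.List.pyGetD (PySem.List.pyGetD t (i1 : Int) []) (j1 : Int) 0]])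
        else transpLoop t fuel (i1 + 1) j1
          (jar ++ [PySem.List.pyGetD (PySem.List.pyGetD t (i1 : Int) []) (j1 : Int) 0]) acc := by
  have h' : ¬ (i1 ≥ t.length) := by omega
  simp only [transpLoop, h', if_false]

-- one iteration of A's while loop, i1 ≥ len(t): reset to row 0, next column
lemma transpLoop_step_ge (t : List (List Int)) (fuel i1 j1 : Nat) (jar : List Int)
    (acc : List (List Int)) (h : i1 ≥ t.length) :
    transpLoop t (fuel + 1) i1 j1 jar acc =
      if j1 + 1 ≥ (PySem.List.pyGetD t 0 []).length then acc
      else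
        if (jar ++ [PySem.List.pyGetD (PySem.List.pyGetD t ((0 : Nat) : Int) []) ((j1 + 1 : Nat) : Int) 0]).length = t.length
        then transpLoop t fuel 1 (j1 + 1) []
          (acc ++ [jar ++ [PySem.List.pyGetD (PySem.List.pyGetD t ((0 : Nat) : Int) []) ((j1 + 1 : Nat) : Int) 0]])
        else transpLoop t fuel 1 (j1 + 1)
          (jar ++ [PySem.List.pyGetD (PySem.List.pyGetD t ((0 : Nat) : Int) []) ((j1 + 1 : Nat) : Int) 0]) acc := by
  simp only [transpLoop, ge_iff_le, h, if_pos]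

-- inner invariant: finishing the current column j1 from row i1 = t.length - k
lemma transpLoop_inner (t : List (List Int)) (m : Nat)
    (hn : 0 < t.length) (hm0 : (PySem.List.pyGetD t 0 []).length = m) (j1 : Nat) (hj : j1 < m) :
    ∀ k fuel acc, 1 ≤ k → k ≤ t.length →
      transpLoop t (k + fuel) (t.length - k) j1 ((colT t j1).take (t.length - k)) acc
        = transpLoop t fuel t.length j1 [] (acc ++ [colT t j1]) := by
  intro k
  induction k with
  | zero => intro fuel acc h1 _; omega
  | succ k ih =>
    intro fuel acc _ hk
    have hlt : t.length - (k + 1) < t.length := by omega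
    have hfe : k + 1 + fuel = (k + fuel) + 1 := by omega
    rw [hfe, transpLoop_step_lt t (k + fuel) _ j1 _ acc hlt]
    rw [if_neg (by omega : ¬ j1 ≥ (PySem.List.pyGetD t 0 []).length)]
    have hjar : (colT t j1).take (t.length - (k + 1)) ++
        [PySem.List.pyGetD (PySem.List.pyGetD t ((t.length - (k + 1) : Nat) : Int) []) ((j1 : Nat) : Int) 0]
        = (colT t j1).take (t.length - (k + 1) + 1) := by
      rw [pyGetD_colT t j1 _ hlt, List.take_add_one]
      congr 1
      rw [List.getElem?_eq_getElem (by rw [length_colT]; exact hlt)]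
      rfl
    rw [hjar]
    have hlen : ((colT t j1).take (t.length - (k + 1) + 1)).length = t.length - (k + 1) + 1 := by
      rw [List.length_take, length_colT]; omega
    by_cases hk0 : k = 0
    · subst hk0
      rw [if_pos (by rw [hlen]; omega)]
      have hfull : (colT t j1).take (t.length - (0 + 1) + 1) = colT t j1 := by
        rw [show t.length - (0 + 1) + 1 = t.length from by omega,
          List.take_of_length_le (by rw [length_colT])]
      rw [hfull, show t.length - (0 + 1) + 1 = t.length from by omega]
      simp only [Nat.zero_add]
    · rw [if_neg (by rw [hlen]; omega)]
      rw [show t.length - (k + 1) + 1 = t.length - k from by omega]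
      exact ih fuel acc (by omega) (by omega)

-- outer invariant: from state (i1 = t.length, j1, []) the loop emits columns j1+1 … m-1
lemma transpLoop_outer (t : List (List Int)) (m : Nat)
    (hn : 0 < t.length) (hm0 : (PySem.List.pyGetD t 0 []).length = m) :
    ∀ d fuel j1 acc, j1 + d + 1 = m →
      transpLoop t (d * (t.length + 1) + 1 + fuel) t.length j1 [] acc
        = acc ++ (List.range d).map (fun r => colT t (j1 + 1 + r)) := by
  intro d
  induction d with
  | zero =>
    intro fuel j1 acc hjm
    rw [show 0 * (t.length + 1) + 1 + fuel = fuel + 1 from by omega]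
    rw [transpLoop_step_ge t fuel _ j1 [] acc (le_refl _)]
    rw [if_pos (by omega)]
    simp
  | succ d ih =>
    intro fuel j1 acc hjm
    have hcomb : ∀ acc' : List (List Int),
        acc' ++ [colT t (j1 + 1)] ++ (List.range d).map (fun r => colT t (j1 + 1 + 1 + r))
          = acc' ++ (List.range (d + 1)).map (fun r => colT t (j1 + 1 + r)) := by
      intro acc'
      have hmap : (List.range (d + 1)).map (fun r => colT t (j1 + 1 + r))
          = colT t (j1 + 1) :: (List.range d).map (fun r => colT t (j1 + 1 + 1 + r)) := by
        rw [List.range_succ_eq_map, List.map_cons, List.map_map]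
        refine congrArg₂ List.cons (by norm_num) ?_
        apply List.map_congr_left
        intro x _
        simp only [Function.comp_apply]
        congr 1
        omega
      rw [List.append_assoc, hmap, List.singleton_append]
    have hfe : (d + 1) * (t.length + 1) + 1 + fuel
        = (d * (t.length + 1) + 1 + (fuel + t.length)) + 1 := by ring
    rw [hfe, transpLoop_step_ge t _ _ j1 [] acc (le_refl _)]
    rw [if_neg (by omega)]
    have hjar : ([] : List Int) ++
        [PySem.List.pyGetD (PySem.List.pyGetD t ((0 : Nat) : Int) []) ((j1 + 1 : Nat) : Int) 0]
        = (colT t (j1 + 1)).take 1 := by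
      rw [pyGetD_colT t (j1 + 1) 0 hn, List.nil_append, List.take_one]
      rw [List.head?_eq_getElem?, List.getElem?_eq_getElem (by rw [length_colT]; exact hn)]
      rfl
    rw [hjar]
    have hlen1 : ((colT t (j1 + 1)).take 1).length = 1 := by
      rw [List.length_take, length_colT]; omega
    by_cases h1 : t.length = 1
    · rw [if_pos (by rw [hlen1]; omega)]
      have hfull : (colT t (j1 + 1)).take 1 = colT t (j1 + 1) := by
        rw [List.take_of_length_le (by rw [length_colT]; omega)]
      rw [hfull, h1]
      have ih' := ih (fuel + 1) (j1 + 1) (acc ++ [colT t (j1 + 1)]) (by omega)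
      rw [h1] at ih'
      rw [ih']
      exact hcomb acc
    · rw [if_neg (by rw [hlen1]; omega)]
      have hn2 : 2 ≤ t.length := by omega
      have hfe2 : d * (t.length + 1) + 1 + (fuel + t.length)
          = (t.length - 1) + (d * (t.length + 1) + 1 + (fuel + 1)) := by omega
      rw [hfe2]
      have hin := transpLoop_inner t m hn hm0 (j1 + 1) (by omega) (t.length - 1)
        (d * (t.length + 1) + 1 + (fuel + 1)) acc (by omega) (by omega)
      rw [show t.length - (t.length - 1) = 1 from by omega] at hin
      rw [hin]
      rw [ih (fuel + 1) (j1 + 1) (acc ++ [colT t (j1 + 1)]) (by omega)]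
      exact hcomb acc

-- peeling the first element off a mapped range
lemma range_map_head {β : Type} (f : Nat → β) (m : Nat) (hm : 0 < m) :
    (List.range m).map f = f 0 :: (List.range (m - 1)).map (fun r => f (0 + 1 + r)) := by
  obtain ⟨m', rfl⟩ : ∃ m', m = m' + 1 := ⟨m - 1, by omega⟩
  rw [List.range_succ_eq_map, List.map_cons, List.map_map]
  simp only [Nat.add_sub_cancel]
  refine congrArg₂ List.cons rfl ?_
  apply List.map_congr_left
  intro x _
  simp only [Function.comp_apply]
  congr 1
  omega

-- ===== VERDICT (by name: the statement is the Claim_ definition above) =====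
theorem transponeeriK_spec : Claim_equal_transponeeriK := by
  intro maatriks _ hpre
  obtain ⟨hne, -⟩ := hpre
  have hn0 : 0 < maatriks.length := List.length_pos_of_ne_nil hne
  unfold Spec_transponeeriK transponeeriK transponeeriK_alt
  simp only []
  -- phase 1 of A builds the 180°-rotated matrix T
  have ht : (PySem.List.pyRange ((maatriks.length : Int) - 1) (-1) (-1)).foldl (fun tAcc i =>
      tAcc ++ [(PySem.List.pyRange (((PySem.List.pyGetD maatriks 0 []).length : Int) - 1) (-1) (-1)).foldl
        (fun rAcc j => rAcc ++ [PySem.List.pyGetD (PySem.List.pyGetD maatriks i []) j 0]) []]) []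
      = (List.range maatriks.length).map (fun (k : Nat) =>
          (List.range (PySem.List.pyGetD maatriks 0 []).length).map (fun (l : Nat) =>
            PySem.List.pyGetD (PySem.List.pyGetD maatriks ((maatriks.length : Int) - 1 - (k : Int)) [])
              (((PySem.List.pyGetD maatriks 0 []).length : Int) - 1 - (l : Int)) 0)) := by
    simp only [PySem.List.foldl_append_singleton_eq_map, PySem.List.pyRange_neg_one,
      List.map_map, List.nil_append]
    rw [show ((maatriks.length : Int) - 1 - (-1)) = (maatriks.length : Int) from by ring,
      show ((((PySem.List.pyGetD maatriks 0 []).length : Int) - 1) - (-1))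
        = ((PySem.List.pyGetD maatriks 0 []).length : Int) from by ring,
      Int.toNat_natCast, Int.toNat_natCast]
    rfl
  rw [ht]
  obtain ⟨m0, hm0def⟩ : ∃ x, (PySem.List.pyGetD maatriks 0 []).length = x := ⟨_, rfl⟩
  rw [hm0def]
  set T := (List.range maatriks.length).map (fun (k : Nat) =>
      (List.range m0).map (fun (l : Nat) =>
        PySem.List.pyGetD (PySem.List.pyGetD maatriks ((maatriks.length : Int) - 1 - (k : Int)) [])
          ((m0 : Int) - 1 - (l : Int)) 0)) with hTdef
  have hTlen : T.length = maatriks.length := by rw [hTdef]; simp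
  have hT0 : 0 < T.length := by rw [hTlen]; exact hn0
  have hm0T : (PySem.List.pyGetD T 0 []).length = m0 := by
    rw [PySem.List.pyGetD_zero, hTdef, PySem.List.getD_map_range _ _ _ _ hn0]
    simp
  have hcol : ∀ r, r < m0 → colT T r = (List.range maatriks.length).map (fun (c : Nat) =>
      PySem.List.pyGetD (PySem.List.pyGetD maatriks ((maatriks.length : Int) - 1 - (c : Int)) [])
        ((m0 : Int) - 1 - (r : Int)) 0) := by
    intro r hr
    rw [colT, hTdef, List.map_map]
    apply List.map_congr_left
    intro k _
    simp only [Function.comp_apply]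
    rw [PySem.List.getD_map_range _ _ _ _ hr]
  by_cases hm0 : m0 = 0
  · -- first row empty: A's while loop breaks at once, B's outer range is empty
    subst hm0
    rw [hm0T, hTlen]
    rw [show (maatriks.length + 1) * (0 + 1) + 2 = (maatriks.length + 2) + 1 from by ring]
    rw [transpLoop_step_lt T _ 0 0 [] [] hT0]
    rw [if_pos (by rw [hm0T])]
    simp
  · -- m0 = m' + 1 > 0: A's loop emits exactly the m0 columns of T
    obtain ⟨m', rfl⟩ : ∃ m', m0 = m' + 1 := ⟨m0 - 1, by omega⟩
    rw [hm0T, hTlen]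
    rw [show (maatriks.length + 1) * (m' + 1 + 1) + 2
        = maatriks.length + (m' * (maatriks.length + 1) + 1 + (maatriks.length + 3)) from by ring]
    have hinner := transpLoop_inner T (m' + 1) hT0 hm0T 0 (by omega) T.length
      (m' * (maatriks.length + 1) + 1 + (maatriks.length + 3)) [] (by omega) (le_refl _)
    rw [Nat.sub_self, List.take_zero, hTlen] at hinner
    rw [hinner]
    have houter := transpLoop_outer T (m' + 1) hT0 hm0T m' (maatriks.length + 3) 0
      ([] ++ [colT T 0]) (by omega)
    rw [hTlen] at houter
    rw [houter]
    rw [range_map_head _ (m' + 1) (by omega)]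
    rw [List.nil_append, List.singleton_append, Nat.add_sub_cancel]
    refine congrArg₂ List.cons ?_ ?_
    · rw [hcol 0 (by omega)]
    · apply List.map_congr_left
      intro r hr
      rw [hcol (0 + 1 + r) (by simp only [List.mem_range] at hr; omega)]
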